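-- pv_equiv track=rewrite | github.com/Nusiq/mcblend | mcblend/operator_func/frame_range.py | get_frames_from_frame_ranges
-- ===== SOURCE A (Python) =====
-- def get_frames_from_frame_range(
--         range_str: str, anim_start: int, anim_end: int
-- ) -> list[int]:
--     """
--     Generates a list of frame numbers from a single slice string like "1:10" or
--     "1:2:10". This is based on Julia's slicing syntax.
--
--     :param range_str: The string defining a single frame slice.
--     :param anim_start: The starting frame of the animation.
--     :param anim_end: The ending frame of the animation.
--     :return: A list of frame numbers.
--     """
--     frames: list[int] = []
--     if range_str == "":
--         return []
--
--     # Get the parts of the range string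
--     parts = range_str.split(':')
--     start_str, step_str, end_str = '', '1', ''
--     if len(parts) == 1:
--         # A single number
--         start_str = end_str = parts[0]
--     elif len(parts) == 2:
--         # start:end
--         start_str, end_str = parts
--     elif len(parts) == 3:
--         # start:step:end
--         start_str, step_str, end_str = parts
--     else:
--         # Invalid format
--         return []
--
--     # Parse the numbers to integers
--     try:
--         start = int(start_str) if start_str != "" else anim_start
--         step = int(step_str) if step_str != "" else 1
--         end = int(end_str) if end_str != "" else anim_end
--     except (ValueError, TypeError):
--         # Invalid number format in slice string
--         return []
--
--     # Invalid format
--     if step <= 0: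
--         return []
--
--     # Evaluate the range
--     current_frame = start
--     if start > end:
--         return []
--     while current_frame <= end:
--         if anim_start <= current_frame <= anim_end:
--             frames.append(current_frame)
--         current_frame += step
--     return frames
--
-- def get_frames_from_frame_ranges(
--         slice_str: str, anim_start: int, anim_end: int) -> tuple[list[int], dict[str, int]]:
--     """
--     Splits a string by commas assuming that each part is a frame range
--     string and evaluates these ranges using get_frames_from_frame_range to
--     return a list of unique frames and a dictionary with the number of frames
--     added by each range.
--
--     :param slice_str: A string with frame ranges separated by commas.
--     :param anim_start: The starting frame of the animation.
--     :param anim_end: The ending frame of the animation.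
--     :return: A list of unique frame numbers sorted in ascending order and a
--         dictionary that maps each range to the number of frames it produced.
--     """
--     if slice_str == "":
--         return [], {}
--     all_frames: set[int] = set()
--
--     # Split by whitespaces, eliminate duplicated ranges to avoid unnecessary
--     # work
--     range_strs = set(i.strip() for i in slice_str.strip().split(","))
--     # Evaluate and append the ranges
--     frame_counts: dict[str, int] = {}
--     for range_str in range_strs:
--         if range_str == "":
--             continue
--         frames = get_frames_from_frame_range(range_str, anim_start, anim_end)
--         all_frames.update(frames)
--         frame_counts[range_str] = len(frames)
--     return sorted(list(all_frames)), frame_counts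
-- ===== SOURCE B (Python) =====
-- def _parse_slice(s, anim_start, anim_end):
--     """Parse one slice string into a clamped triple (first, step, hi) whose
--     frames are exactly range(first, hi + 1, step); None if the slice is
--     invalid or empty."""
--     parts = s.split(':')
--     if len(parts) > 3:
--         return None
--     try:
--         start = int(parts[0]) if parts[0] != "" else anim_start
--         step = int(parts[1]) if len(parts) == 3 and parts[1] != "" else 1
--         end = int(parts[-1]) if parts[-1] != "" else anim_end
--     except ValueError:
--         return None
--     if step <= 0 or end < start:
--         return None
--     first = start + (max(start, anim_start) - start + step - 1) // step * step
--     return (first, step, min(end, anim_end))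
--
--
-- def get_frames_from_frame_ranges(slice_str, anim_start, anim_end):
--     if slice_str == "":
--         return [], {}
--     # staged passes: names -> parsed triples -> arithmetic counts / frame set
--     names = list(dict.fromkeys(
--         s for s in (p.strip() for p in slice_str.strip().split(",")) if s != ""))
--     parsed = [(s, _parse_slice(s, anim_start, anim_end)) for s in names]
--     frame_counts = {
--         s: 0 if t is None or t[2] < t[0] else (t[2] - t[0]) // t[1] + 1
--         for s, t in parsed}
--     all_frames = sorted({f for _, t in parsed if t is not None
--                          for f in range(t[0], t[2] + 1, t[1])})
--     return all_frames, frame_counts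
-- ===== Notes on version B (the rewrite author's own statement) =====
-- stated objective: faster
-- what changed: B replaces A's per-slice frame-by-frame while loop with a per-frame window test and A's incremental set/dict accumulation by staged passes: each slice is parsed once into a triple clamped arithmetically to the animation window on the slice's step grid, the per-range counts are computed arithmetically from the triple without generating frames, and the frame set is emitted with range() over the clamped triples only.
import Mathlib
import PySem

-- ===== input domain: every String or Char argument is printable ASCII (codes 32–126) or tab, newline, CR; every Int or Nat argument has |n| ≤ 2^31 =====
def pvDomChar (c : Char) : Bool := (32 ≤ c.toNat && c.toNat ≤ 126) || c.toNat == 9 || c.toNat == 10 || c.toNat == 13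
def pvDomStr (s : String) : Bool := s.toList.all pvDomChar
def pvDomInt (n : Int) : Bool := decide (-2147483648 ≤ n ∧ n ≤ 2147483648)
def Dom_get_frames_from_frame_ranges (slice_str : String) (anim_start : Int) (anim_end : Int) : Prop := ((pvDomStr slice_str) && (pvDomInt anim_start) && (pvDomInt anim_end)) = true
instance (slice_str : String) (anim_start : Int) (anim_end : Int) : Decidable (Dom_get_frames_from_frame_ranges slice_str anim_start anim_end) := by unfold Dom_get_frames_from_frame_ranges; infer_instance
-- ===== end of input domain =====

-- B replaces A's frame-by-frame while loop and incremental set/dict accumulation by staged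
-- passes: each slice is parsed once into a clamped (first, step, hi) triple, the per-range
-- counts are computed arithmetically from the triple, and the frames are emitted with range();
-- objective: faster per-range work.

-- ===== PORT A =====
-- s.split(sep) for a non-empty literal separator: PySem.Str.split? is none only for sep = ""
def pySplit (s sep : String) : List String := (PySem.Str.split? s sep).getD []

-- the 'while current_frame <= end' loop of get_frames_from_frame_range
def pyA_loop (anim_start anim_end endv step : Int) (hstep : 0 < step) (cur : Int)
    (acc : List Int) : List Int :=
  if cur ≤ endv then
    pyA_loop anim_start anim_end endv step hstep (cur + step)
      (if anim_start ≤ cur ∧ cur ≤ anim_end then acc ++ [cur] else acc)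
  else acc
termination_by (endv + 1 - cur).toNat
decreasing_by omega

-- the parse-and-evaluate tail of get_frames_from_frame_range (after parts are named)
def pyA_eval (start_str step_str end_str : String) (anim_start anim_end : Int) : List Int :=
  match (if start_str ≠ "" then PySem.Int.ofStr? start_str else some anim_start),
        (if step_str ≠ "" then PySem.Int.ofStr? step_str else some (1 : Int)),
        (if end_str ≠ "" then PySem.Int.ofStr? end_str else some anim_end) with
  | some start, some step, some endv =>
    if h : step ≤ 0 then []
    else if start > endv then []
    else pyA_loop anim_start anim_end endv step (by omega) start []
  | _, _, _ => []

def get_frames_from_frame_range (range_str : String) (anim_start anim_end : Int) : List Int :=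
  if range_str = "" then []
  else
    match pySplit range_str ":" with
    | [p0] => pyA_eval p0 "1" p0 anim_start anim_end
    | [p0, p1] => pyA_eval p0 "1" p1 anim_start anim_end
    | [p0, p1, p2] => pyA_eval p0 p1 p2 anim_start anim_end
    | _ => []

def get_frames_from_frame_ranges (slice_str : String) (anim_start : Int) (anim_end : Int) :
    List Int × (List (String × Int)) :=
  if slice_str = "" then ([], [])
  else
    let range_strs : PySem.Set String :=
      PySem.Set.ofList
        ((pySplit (PySem.Str.strip slice_str) ",").map (fun i => PySem.Str.strip i))
    let res : PySem.Set Int × PySem.Dict String Int :=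
      range_strs.foldl
        (fun st range_str =>
          if range_str = "" then st
          else
            let frames := get_frames_from_frame_range range_str anim_start anim_end
            (PySem.Set.update st.1 frames, st.2.insert range_str (frames.length : Int)))
        (PySem.Set.empty, PySem.Dict.empty)
    (PySem.List.sorted res.1 (fun x => x) false, res.2.items)

-- ===== PORT B =====
-- _parse_slice: one slice -> clamped triple (first, step, hi) or none.  parts[0] / parts[-1]
-- are ported as headD / getLastD with a dummy default: s.split(':') is never the empty list.
def parseSlice (s : String) (anim_start anim_end : Int) : Option (Int × Int × Int) :=
  let parts := pySplit s ":"
  if 3 < parts.length then none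
  else
    match (if parts.headD "" ≠ "" then PySem.Int.ofStr? (parts.headD "") else some anim_start),
          (if parts.length = 3 ∧ parts.getD 1 "" ≠ "" then PySem.Int.ofStr? (parts.getD 1 "")
           else some (1 : Int)),
          (if parts.getLastD "" ≠ "" then PySem.Int.ofStr? (parts.getLastD "") else some anim_end)
        with
    | some start, some step, some endv =>
      if step ≤ 0 ∨ endv < start then none
      else
        some (start + PySem.Int.floordiv (max start anim_start - start + step - 1) step * step,
          step, min endv anim_end)
    | _, _, _ => none

def get_frames_from_frame_ranges_alt (slice_str : String) (anim_start : Int) (anim_end : Int) :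
    List Int × (List (String × Int)) :=
  if slice_str = "" then ([], [])
  else
    let names : List String :=
      PySem.List.dedup
        (((pySplit (PySem.Str.strip slice_str) ",").map (fun p => PySem.Str.strip p)).filter
          (fun s => !(s == "")))
    let parsed : List (String × Option (Int × Int × Int)) :=
      names.map (fun s => (s, parseSlice s anim_start anim_end))
    let frame_counts : PySem.Dict String Int :=
      PySem.Dict.ofList
        (parsed.map (fun p => (p.1,
          match p.2 with
          | none => (0 : Int)
          | some (first, step, hi) =>
            if hi < first then 0 else PySem.Int.floordiv (hi - first) step + 1)))
    let all_frames : PySem.Set Int :=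
      PySem.Set.ofList
        ((parsed.filterMap (fun p => p.2)).flatMap
          (fun t => PySem.List.pyRange t.1 (t.2.2 + 1) t.2.1))
    (PySem.List.sorted all_frames (fun x => x) false, frame_counts.items)

-- ===== PRECONDITION & SPEC =====
def Spec_get_frames_from_frame_ranges (slice_str : String) (anim_start : Int) (anim_end : Int) (out : List Int × (List (String × Int))) : Prop := out = get_frames_from_frame_ranges_alt slice_str anim_start anim_end
instance (slice_str : String) (anim_start : Int) (anim_end : Int) (out : List Int × (List (String × Int))) : Decidable (Spec_get_frames_from_frame_ranges slice_str anim_start anim_end out) := by unfold Spec_get_frames_from_frame_ranges; infer_instance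

-- ===== CLAIM (what is proved, stated in full; the proofs are below) =====
def Claim_equal_get_frames_from_frame_ranges : Prop := ∀ (slice_str : String) (anim_start : Int) (anim_end : Int), Dom_get_frames_from_frame_ranges slice_str anim_start anim_end → Spec_get_frames_from_frame_ranges slice_str anim_start anim_end (get_frames_from_frame_ranges slice_str anim_start anim_end)

-- ===== LEMMAS AND PROOFS =====

-- the frames described by a parsed triple (none = invalid slice, no frames)
def sliceFrames : Option (Int × Int × Int) → List Int
  | none => []
  | some (first, step, hi) => PySem.List.pyRange first (hi + 1) step

-- the arithmetic count B stores for a parsed triple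
def sliceCount : Option (Int × Int × Int) → Int
  | none => 0
  | some (first, step, hi) =>
    if hi < first then 0 else PySem.Int.floordiv (hi - first) step + 1

lemma pvRange_nil {a b s : Int} (hs : 0 < s) (hba : b ≤ a) : PySem.List.pyRange a b s = [] := by
  rw [PySem.List.pyRange_of_pos _ _ hs]
  simp [show ¬ a < b by omega]

lemma pvRange_cons {a b s : Int} (hs : 0 < s) (hab : a < b) :
    PySem.List.pyRange a b s = a :: PySem.List.pyRange (a + s) b s := by
  rw [PySem.List.pyRange_of_pos _ _ hs, PySem.List.pyRange_of_pos _ _ hs, if_pos hab]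
  have hnn : 0 ≤ (b - a - 1) / s := Int.ediv_nonneg (by omega) hs.le
  have hshift : (b - a + s - 1) / s = (b - a - 1) / s + 1 := by
    have h := Int.add_mul_ediv_right (b - a - 1) 1 (show s ≠ 0 by omega)
    have h2 : b - a + s - 1 = b - a - 1 + 1 * s := by ring
    rw [h2, h]
  have hcnt : (if a + s < b then ((b - (a + s) + s - 1) / s).toNat else 0)
      = ((b - a - 1) / s).toNat := by
    by_cases h2 : a + s < b
    · rw [if_pos h2]
      congr 2
      ring
    · have hz : (b - a - 1) / s = 0 := Int.ediv_eq_zero_of_lt (by omega) (by omega)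
      rw [if_neg h2, hz]
      rfl
  rw [hcnt, hshift, show ((b - a - 1) / s + 1).toNat = ((b - a - 1) / s).toNat + 1 by omega,
    List.range_succ_eq_map]
  simp only [List.map_cons, List.map_map]
  congr 1
  · norm_num
  · refine List.map_congr_left (fun k _ => ?_)
    simp only [Function.comp]
    push_cast
    ring

lemma pyA_loop_eq (A E endv s : Int) (hs : 0 < s) :
    ∀ (n : Nat) (cur : Int) (acc : List Int), (endv + 1 - cur).toNat ≤ n →
      pyA_loop A E endv s hs cur acc
        = acc ++ PySem.List.pyRange (cur + s * ((max cur A - cur + s - 1) / s)) (min endv E + 1) s := by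
  intro n
  induction n with
  | zero =>
    intro cur acc hn
    have hc : ¬ cur ≤ endv := by omega
    rw [pyA_loop, if_neg hc]
    have hx : cur ≤ max cur A := le_max_left cur A
    have hq : 0 ≤ (max cur A - cur + s - 1) / s := Int.ediv_nonneg (by omega) hs.le
    have hm : 0 ≤ s * ((max cur A - cur + s - 1) / s) := mul_nonneg hs.le hq
    have hmin : min endv E ≤ endv := min_le_left endv E
    rw [pvRange_nil hs (by omega)]
    simp
  | succ n ih =>
    intro cur acc hn
    by_cases hc : cur ≤ endv
    · rw [pyA_loop, if_pos hc, ih (cur + s) _ (by omega)]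
      by_cases hA : A ≤ cur ∧ cur ≤ E
      · rw [if_pos hA]
        have hm1 : max cur A = cur := max_eq_left hA.1
        have hm2 : max (cur + s) A = cur + s := max_eq_left (by omega)
        have hq1 : (max cur A - cur + s - 1) / s = 0 := by
          rw [hm1]
          exact Int.ediv_eq_zero_of_lt (by omega) (by omega)
        have hq2 : (max (cur + s) A - (cur + s) + s - 1) / s = 0 := by
          rw [hm2]
          exact Int.ediv_eq_zero_of_lt (by omega) (by omega)
        rw [hq1, hq2, mul_zero, add_zero, add_zero]
        have hlt : cur < min endv E + 1 := by
          have h := le_min hc hA.2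
          omega
        rw [pvRange_cons (a := cur) (b := min endv E + 1) (s := s) hs hlt]
        simp
      · rw [if_neg hA]
        rcases not_and_or.mp hA with hA' | hE'
        · -- cur < A : the first kept frame is unchanged by one skipped step
          have hA' : cur < A := by omega
          have hm1 : max cur A = A := max_eq_right (by omega)
          by_cases h2 : A ≤ cur + s
          · have hm2 : max (cur + s) A = cur + s := max_eq_left h2
            have hq2 : (max (cur + s) A - (cur + s) + s - 1) / s = 0 := by
              rw [hm2]
              exact Int.ediv_eq_zero_of_lt (by omega) (by omega)
            have hq1 : (max cur A - cur + s - 1) / s = 1 := by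
              rw [hm1]
              have hc1 : A - cur + s - 1 = (A - cur - 1) + 1 * s := by ring
              rw [hc1, Int.add_mul_ediv_right _ _ (show s ≠ 0 by omega),
                Int.ediv_eq_zero_of_lt (by omega) (by omega)]
              norm_num
            rw [hq1, hq2, mul_zero, add_zero, mul_one]
          · have hm2 : max (cur + s) A = A := max_eq_right (by omega)
            have key : (max cur A - cur + s - 1) / s
                = (max (cur + s) A - (cur + s) + s - 1) / s + 1 := by
              rw [hm1, hm2]
              have h3 : A - cur + s - 1 = (A - (cur + s) + s - 1) + 1 * s := by ring
              rw [h3, Int.add_mul_ediv_right _ _ (show s ≠ 0 by omega)]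
            rw [key]
            congr 2
            ring
        · -- E < cur : nothing is kept any more, both ranges are empty
          have hE' : E < cur := by omega
          have hx1 : cur ≤ max cur A := le_max_left cur A
          have hx2 : cur + s ≤ max (cur + s) A := le_max_left (cur + s) A
          have hq1 : 0 ≤ (max cur A - cur + s - 1) / s := Int.ediv_nonneg (by omega) hs.le
          have hq2 : 0 ≤ (max (cur + s) A - (cur + s) + s - 1) / s :=
            Int.ediv_nonneg (by omega) hs.le
          have hn1 : 0 ≤ s * ((max cur A - cur + s - 1) / s) := mul_nonneg hs.le hq1
          have hn2 : 0 ≤ s * ((max (cur + s) A - (cur + s) + s - 1) / s) := mul_nonneg hs.le hq2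
          have hmin : min endv E ≤ E := min_le_right endv E
          rw [pvRange_nil hs (by omega), pvRange_nil hs (by omega)]
    · rw [pyA_loop, if_neg hc]
      have hx : cur ≤ max cur A := le_max_left cur A
      have hq : 0 ≤ (max cur A - cur + s - 1) / s := Int.ediv_nonneg (by omega) hs.le
      have hm : 0 ≤ s * ((max cur A - cur + s - 1) / s) := mul_nonneg hs.le hq
      have hmin : min endv E ≤ endv := min_le_left endv E
      rw [pvRange_nil hs (by omega)]
      simp

-- A's evaluation tail equals the frames of B's clamped triple (stated on the three options)
lemma eval_clamp (o1 o2 o3 : Option Int) (A E : Int) :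
    (match o1, o2, o3 with
     | some start, some step, some endv =>
       if h : step ≤ 0 then []
       else if start > endv then []
       else pyA_loop A E endv step (by omega) start []
     | _, _, _ => [])
      = sliceFrames
          (match o1, o2, o3 with
           | some start, some step, some endv =>
             if step ≤ 0 ∨ endv < start then none
             else
               some (start + PySem.Int.floordiv (max start A - start + step - 1) step * step,
                 step, min endv E)
           | _, _, _ => none) := by
  cases o1 with
  | none => cases o2 <;> cases o3 <;> rfl
  | some start =>
    cases o2 with
    | none => cases o3 <;> rfl
    | some step =>
      cases o3 with
      | none => rfl
      | some endv =>
        simp only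
        by_cases hstep : step ≤ 0
        · rw [dif_pos hstep, if_pos (Or.inl hstep)]
          rfl
        · rw [dif_neg hstep]
          by_cases hse : start > endv
          · rw [if_pos hse, if_pos (Or.inr hse)]
            rfl
          · rw [if_neg hse, if_neg (by omega : ¬ (step ≤ 0 ∨ endv < start))]
            have hs : 0 < step := by omega
            rw [pyA_loop_eq A E endv step hs _ start [] le_rfl]
            rw [PySem.Int.floordiv_eq_ediv_of_pos hs]
            simp [sliceFrames, mul_comm]

lemma splitOn_go_ne_nil (sep : List Char) :
    ∀ (fuel : Nat) (l cur : List Char) (acc : List (List Char)),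
      PySem.Chars.splitOn.go sep fuel l cur acc ≠ [] := by
  intro fuel
  induction fuel with
  | zero =>
    intro l cur acc
    simp [PySem.Chars.splitOn.go]
  | succ n ih =>
    intro l cur acc
    cases l with
    | nil => simp [PySem.Chars.splitOn.go]
    | cons c rest =>
      rw [PySem.Chars.splitOn.go]
      split
      · exact ih _ _ _
      · exact ih _ _ _

lemma pySplit_ne_nil (s : String) : pySplit s ":" ≠ [] := by
  have h := PySem.Str.split?_map s ":"
  unfold pySplit
  cases hsp : PySem.Str.split? s ":" with
  | none =>
    rw [hsp] at h
    simp [PySem.Chars.split?] at h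
  | some xs =>
    rw [hsp] at h
    simp only [Option.map_some] at h
    intro hx
    simp only [Option.getD_some] at hx
    rw [hx] at h
    simp [PySem.Chars.split?, PySem.Chars.splitOn] at h
    exact splitOn_go_ne_nil _ _ _ _ _ h

lemma range_eq (r : String) (A E : Int) (hr : r ≠ "") :
    get_frames_from_frame_range r A E = sliceFrames (parseSlice r A E) := by
  unfold get_frames_from_frame_range parseSlice
  rw [if_neg hr]
  have e1 : (if ("1" : String) ≠ "" then PySem.Int.ofStr? "1" else some (1 : Int)) = some 1 := by
    decide
  cases h : pySplit r ":" with
  | nil => exact absurd h (pySplit_ne_nil r)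
  | cons p0 t0 =>
    cases t0 with
    | nil =>
      simp only [List.length_cons, List.length_nil, List.headD_cons, List.getLastD_cons,
        List.getLastD_nil]
      rw [if_neg (show ¬ (3 < 0 + 1) by omega),
        if_neg (show ¬ (0 + 1 = 3 ∧ [p0].getD 1 "" ≠ "") from fun hc => absurd hc.1 (by omega))]
      unfold pyA_eval
      rw [e1]
      exact eval_clamp _ _ _ A E
    | cons p1 t1 =>
      cases t1 with
      | nil =>
        simp only [List.length_cons, List.length_nil, List.headD_cons, List.getLastD_cons,
          List.getLastD_nil]
        rw [if_neg (show ¬ (3 < 0 + 1 + 1) by omega),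
          if_neg (show ¬ (0 + 1 + 1 = 3 ∧ [p0, p1].getD 1 "" ≠ "") from
            fun hc => absurd hc.1 (by omega))]
        unfold pyA_eval
        rw [e1]
        exact eval_clamp _ _ _ A E
      | cons p2 t2 =>
        cases t2 with
        | nil =>
          simp only [List.length_cons, List.length_nil, List.headD_cons, List.getLastD_cons,
            List.getLastD_nil, List.getD_cons_succ, List.getD_cons_zero]
          rw [if_neg (show ¬ (3 < 0 + 1 + 1 + 1) by omega)]
          simp only [true_and]
          unfold pyA_eval
          exact eval_clamp _ _ _ A E
        | cons p3 t3 =>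
          simp only [List.length_cons]
          rw [if_pos (by omega)]
          rfl

lemma parse_step_pos (r : String) (A E f st h : Int)
    (hp : parseSlice r A E = some (f, st, h)) : 0 < st := by
  unfold parseSlice at hp
  by_cases h3 : 3 < (pySplit r ":").length
  · rw [if_pos h3] at hp
    exact absurd hp (by simp)
  · rw [if_neg h3] at hp
    split at hp
    · split at hp
      · exact absurd hp (by simp)
      · rename_i start step endv heq hguard
        simp only [Option.some.injEq, Prod.mk.injEq] at hp
        omega
    · exact absurd hp (by simp)

lemma count_eq (r : String) (A E : Int) (hr : r ≠ "") :
    ((get_frames_from_frame_range r A E).length : Int) = sliceCount (parseSlice r A E) := by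
  rw [range_eq r A E hr]
  cases hp : parseSlice r A E with
  | none => rfl
  | some t =>
    obtain ⟨f, st, hi⟩ := t
    have hst := parse_step_pos r A E f st hi hp
    simp only [sliceFrames, sliceCount]
    rw [PySem.List.pyRange_of_pos _ _ hst]
    by_cases hfh : hi < f
    · rw [if_pos hfh, if_neg (by omega : ¬ f < hi + 1)]
      rfl
    · rw [if_neg hfh, if_pos (by omega : f < hi + 1)]
      simp only [List.length_map, List.length_range]
      rw [PySem.Int.floordiv_eq_ediv_of_pos hst]
      have hshift : (hi + 1 - f + st - 1) / st = (hi - f) / st + 1 := by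
        have h2 : hi + 1 - f + st - 1 = hi - f + 1 * st := by ring
        rw [h2, Int.add_mul_ediv_right _ _ (show st ≠ 0 by omega)]
      rw [hshift]
      have hnn : 0 ≤ (hi - f) / st := Int.ediv_nonneg (by omega) hst.le
      omega

lemma filter_ofList (p : String → Bool) (L : List String) :
    (PySem.Set.ofList L).filter p = PySem.Set.ofList (L.filter p) := by
  induction L using List.reverseRecOn with
  | nil => rfl
  | append_singleton L x ih =>
    rw [PySem.Set.ofList_append_singleton, PySem.Set.add_eq_ite, List.filter_append]
    by_cases hpx : p x
    · simp only [List.filter_cons, hpx, List.filter_nil, if_true]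
      rw [PySem.Set.ofList_append_singleton, PySem.Set.add_eq_ite]
      by_cases hx : x ∈ L
      · rw [if_pos (by rw [PySem.Set.mem_ofList]; exact hx),
          if_pos (by rw [PySem.Set.mem_ofList, List.mem_filter]; exact ⟨hx, hpx⟩), ih]
      · rw [if_neg (by rw [PySem.Set.mem_ofList]; exact hx),
          if_neg (by rw [PySem.Set.mem_ofList, List.mem_filter]; exact fun hc => hx hc.1),
          List.filter_append, ih]
        simp [hpx]
    · simp only [List.filter_cons, hpx, List.filter_nil, Bool.false_eq_true, if_false,
        List.append_nil]
      rw [← ih]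
      by_cases hx : x ∈ PySem.Set.ofList L
      · rw [if_pos hx]
      · rw [if_neg hx, List.filter_append]
        simp [hpx]

lemma foldl_update_eq (l : List String) (g : String → List Int) (S : PySem.Set Int) :
    l.foldl (fun S x => PySem.Set.update S (g x)) S = PySem.Set.update S (l.flatMap g) := by
  induction l generalizing S with
  | nil => rfl
  | cons x xs ih =>
    rw [List.foldl_cons, List.flatMap_cons, PySem.Set.update_append, ih]

lemma flatMap_frames (A E : Int) (l : List String) (h : ∀ s ∈ l, s ≠ "") :
    l.flatMap (fun s => get_frames_from_frame_range s A E)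
      = (l.filterMap (fun s => parseSlice s A E)).flatMap
          (fun t => PySem.List.pyRange t.1 (t.2.2 + 1) t.2.1) := by
  induction l with
  | nil => rfl
  | cons x xs ih =>
    rw [List.flatMap_cons, List.filterMap_cons,
      range_eq x A E (h x (List.mem_cons_self)),
      ih (fun t ht => h t (List.mem_cons_of_mem _ ht))]
    cases hp : parseSlice x A E with
    | none => rfl
    | some t =>
      obtain ⟨f, st, hi⟩ := t
      rw [List.flatMap_cons]
      rfl

-- ===== VERDICT (by name: the statement is the Claim_ definition above) =====
theorem get_frames_from_frame_ranges_spec : Claim_equal_get_frames_from_frame_ranges := by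
  unfold Claim_equal_get_frames_from_frame_ranges
  intro s A E _
  unfold Spec_get_frames_from_frame_ranges
  unfold get_frames_from_frame_ranges get_frames_from_frame_ranges_alt
  by_cases hs : s = ""
  · rw [if_pos hs, if_pos hs]
  · rw [if_neg hs, if_neg hs]
    simp only [PySem.List.dedup_eq_ofList]
    have hstepA :
        (fun (st : PySem.Set Int × PySem.Dict String Int) range_str =>
            if range_str = "" then st
            else
              let frames := get_frames_from_frame_range range_str A E
              (PySem.Set.update st.1 frames, st.2.insert range_str (frames.length : Int)))
          = (fun st x =>
              if ¬ (x = "") then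
                (PySem.Set.update st.1 (get_frames_from_frame_range x A E),
                  st.2.insert x ((get_frames_from_frame_range x A E).length : Int))
              else st) := by
      funext st x
      rw [ite_not]
    rw [hstepA, PySem.List.foldl_ite_eq_foldl_filter,
      show (List.filter (fun x => decide ¬ x = "")
            (PySem.Set.ofList
              (List.map (fun i => PySem.Str.strip i) (pySplit (PySem.Str.strip s) ","))))
          = (List.filter (fun x => !(x == ""))
            (PySem.Set.ofList
              (List.map (fun i => PySem.Str.strip i) (pySplit (PySem.Str.strip s) ","))))
        from List.filter_congr (fun x _ => by by_cases hx : x = "" <;> simp [hx]),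
      filter_ofList]
    rw [PySem.List.foldl_prod_mk
        (f := fun (S : PySem.Set Int) x => PySem.Set.update S (get_frames_from_frame_range x A E))
        (g := fun (d : PySem.Dict String Int) x =>
          d.insert x ((get_frames_from_frame_range x A E).length : Int))]
    have hne : ∀ x ∈ PySem.Set.ofList
        (List.filter (fun x => !(x == ""))
          (List.map (fun i => PySem.Str.strip i) (pySplit (PySem.Str.strip s) ","))), x ≠ "" := by
      intro x hx
      rw [PySem.Set.mem_ofList, List.mem_filter] at hx
      simpa using hx.2
    have hnd : (PySem.Set.ofList
        (List.filter (fun x => !(x == ""))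
          (List.map (fun i => PySem.Str.strip i) (pySplit (PySem.Str.strip s) ",")))).Nodup :=
      PySem.Set.nodup_ofList _
    dsimp only
    refine Prod.ext ?_ ?_
    · rw [foldl_update_eq, PySem.Set.update_empty, flatMap_frames A E _ hne]
      simp only [List.filterMap_map]
      rfl
    · rw [PySem.Dict.items_foldl_insert_fresh _ (fun x => x)
        (fun x => ((get_frames_from_frame_range x A E).length : Int)) PySem.Dict.empty
        (fun a _ => PySem.Dict.contains_empty _) (by rw [List.map_id']; exact hnd)]
      simp only [PySem.Dict.ofList, PySem.Dict.update]
      rw [PySem.Dict.items_foldl_insert_fresh _ Prod.fst Prod.snd PySem.Dict.empty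
        (fun a _ => PySem.Dict.contains_empty _)
        (by simp only [List.map_map]; simpa [Function.comp_def] using hnd)]
      rw [show (PySem.Dict.empty : PySem.Dict String Int).items = [] from rfl]
      simp only [List.nil_append, List.map_map]
      refine List.map_congr_left ?_
      intro x hx
      have hxne := hne x hx
      simp only [Function.comp_def]
      rw [count_eq x A E hxne]
      cases hp : parseSlice x A E with
      | none => rfl
      | some t =>
        obtain ⟨f, st, hi⟩ := t
        rfl
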